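-- pv_equiv track=rewrite | github.com/jmh0036/Codility | Lessons/TimeComplexity/TapeEquilibrium.py | solution
-- ===== SOURCE A (Python) =====
-- def solution(A):
--     PartialSums = []
--     nextSum = 0
--     for i in A:
--         nextSum += i
--         PartialSums.append(nextSum)
--     Differences = []
--     for i in range(len(PartialSums)-1):
--         FirstHalf = PartialSums[i]
--         SecondHalf = PartialSums[-1]-FirstHalf
--         Differences.append(abs(FirstHalf-SecondHalf))
--     return min(Differences)
-- ===== SOURCE B (Python) =====
-- def solution(A):
--     # Scan back-to-front: grow the right-half sum from the last element and
--     # minimise |2*right - total| (= |left - right|); no intermediate lists.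
--     total = sum(A)
--     right = A[-1]
--     best = abs(2 * right - total)
--     for x in reversed(A[1:-1]):
--         right += x
--         best = min(best, abs(2 * right - total))
--     return best
-- ===== Notes on version B (the rewrite author's own statement) =====
-- stated objective: alternative
-- what changed: B scans the list back-to-front growing a right-half sum and minimising |2*right - total| on the fly, instead of A's three staged passes building a prefix-sum list and a differences list and taking min of the latter; Pre_ excludes lists with fewer than two elements, on which A raises ValueError.
-- outside the precondition, e.g. on solution([]): A raises ValueError, B raises IndexError
import Mathlib
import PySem

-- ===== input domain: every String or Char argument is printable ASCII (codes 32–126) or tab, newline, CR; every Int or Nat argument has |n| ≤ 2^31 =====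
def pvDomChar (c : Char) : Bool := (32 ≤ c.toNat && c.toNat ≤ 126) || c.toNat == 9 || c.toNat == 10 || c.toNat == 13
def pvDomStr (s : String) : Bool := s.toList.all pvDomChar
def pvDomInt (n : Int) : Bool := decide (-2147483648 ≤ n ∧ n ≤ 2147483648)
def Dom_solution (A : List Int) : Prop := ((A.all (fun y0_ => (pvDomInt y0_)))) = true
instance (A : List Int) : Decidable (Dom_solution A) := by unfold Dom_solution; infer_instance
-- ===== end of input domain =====

-- B change (one line): B scans the list back-to-front growing a right-half sum and minimising
-- |2*right - total| on the fly, instead of A's three staged passes over two intermediate lists.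

-- ===== PORT A =====
-- literal transliteration of A: build PartialSums, then Differences over range(len-1), then min
def solution (A : List Int) : Int :=
  let ps := (A.foldl (fun (st : List Int × Int) i => (st.1 ++ [st.2 + i], st.2 + i)) ([], 0)).1
  let diffs := (PySem.List.pyRange 0 ((ps.length : Int) - 1) 1).foldl
    (fun ds i =>
      let firstHalf := PySem.List.pyGetD ps i 0
      let secondHalf := PySem.List.pyGetD ps (-1) 0 - firstHalf
      ds ++ [|firstHalf - secondHalf|]) []
  (PySem.List.min? diffs (fun x => x)).getD 0   -- min([]) raises ValueError: excluded by Pre_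

-- ===== PORT B =====
-- literal transliteration of B: right = A[-1], then fold over reversed(A[1:-1]) carrying (best, right)
def solution_alt (A : List Int) : Int :=
  let total := A.sum
  let right0 := (PySem.List.pyGet? A (-1)).getD 0   -- A[-1]; empty A raises IndexError: excluded by Pre_
  let best0 := |2 * right0 - total|
  let st := ((PySem.List.slice A (some 1) (some (-1))).reverse).foldl
    (fun (st : Int × Int) x =>
      let right := st.2 + x
      (min st.1 |2 * right - total|, right)) (best0, right0)
  st.1

-- ===== PRECONDITION & SPEC =====
-- Pre_ excludes exactly the inputs with fewer than two elements, on which A raises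
-- ValueError (min of the empty Differences list) and B raises IndexError (A[-1]) on [].
def Pre_solution (A : List Int) : Prop := 2 ≤ A.length
instance (A : List Int) : Decidable (Pre_solution A) := by unfold Pre_solution; infer_instance
def pvWitness_solution : List Int := [3, 1, 2, 4, 3]

def Spec_solution (A : List Int) (out : Int) : Prop := out = solution_alt A
instance (A : List Int) (out : Int) : Decidable (Spec_solution A out) := by unfold Spec_solution; infer_instance

-- ===== CLAIM (what is proved, stated in full; the proofs are below) =====
def Claim_equal_solution : Prop := ∀ (A : List Int), Dom_solution A → Pre_solution A → Spec_solution A (solution A)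

-- ===== LEMMAS AND PROOFS =====

-- prefix sums starting from accumulator s
def pfx (s : Int) : List Int → List Int
  | [] => []
  | a :: t => (s + a) :: pfx (s + a) t

theorem pfx_cons (s a : Int) (t : List Int) : pfx s (a :: t) = (s + a) :: pfx (s + a) t := rfl

theorem pfx_length (s : Int) (l : List Int) : (pfx s l).length = l.length := by
  induction l generalizing s with
  | nil => rfl
  | cons a t ih => simp [pfx, ih]

theorem pfx_append (s : Int) (l1 l2 : List Int) :
    pfx s (l1 ++ l2) = pfx s l1 ++ pfx (s + l1.sum) l2 := by
  induction l1 generalizing s with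
  | nil => simp [pfx]
  | cons a t ih => simp [pfx, ih, add_assoc]

theorem foldlA_eq (l : List Int) (acc : List Int) (s : Int) :
    l.foldl (fun (st : List Int × Int) i => (st.1 ++ [st.2 + i], st.2 + i)) (acc, s)
      = (acc ++ pfx s l, s + l.sum) := by
  induction l generalizing acc s with
  | nil => simp [pfx]
  | cons a t ih => simp [pfx, ih, add_assoc]

theorem pfx_getLast? (s : Int) (l : List Int) (h : l ≠ []) :
    (pfx s l).getLast? = some (s + l.sum) := by
  induction l generalizing s with
  | nil => simp at h
  | cons a t ih =>
    cases t with
    | nil => simp [pfx]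
    | cons b u =>
      rw [pfx_cons, pfx_cons, List.getLast?_cons_cons, ← pfx_cons, ih (s + a) (by simp)]
      simp [add_assoc]

-- the append-fold builds the map
theorem foldl_append_map {α : Type} (g : α → Int) (l : List α) (acc : List Int) :
    l.foldl (fun ds i => ds ++ [g i]) acc = acc ++ l.map g := by
  induction l generalizing acc with
  | nil => simp
  | cons a t ih => simp [ih]

theorem map_range_pyGetD (xs : List Int) (m : Nat) (h : m ≤ xs.length) :
    (List.range m).map (fun k => PySem.List.pyGetD xs ((k : Nat) : Int) 0) = xs.take m := by
  induction m with
  | zero => simp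
  | succ n ih =>
    have hn : n < xs.length := by omega
    rw [List.range_succ, List.map_append, ih (by omega), List.take_add_one]
    simp [PySem.List.pyGetD_natCast, List.getElem?_eq_getElem hn]

-- B's slice A[1:-1]
theorem slice_one_neg_one (xs : List Int) :
    PySem.List.slice xs (some 1) (some (-1)) = xs.tail.dropLast := by
  simp [PySem.List.slice, PySem.List.clampIdx]
  rcases xs with _ | ⟨a, t⟩
  · simp
  · simp only [if_neg (by simp : (a :: t : List Int) ≠ [])]
    rw [List.dropLast_eq_take]
    simp

-- B's fold carries (running min of g over prefix sums, running sum)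
theorem foldlB_eq (g : Int → Int) (l : List Int) (b s : Int) :
    l.foldl (fun (st : Int × Int) x => (min st.1 (g (st.2 + x)), st.2 + x)) (b, s)
      = (((pfx s l).map g).foldl min b, s + l.sum) := by
  induction l generalizing b s with
  | nil => simp [pfx]
  | cons a t ih => simp [pfx, ih, add_assoc]

-- reversing the middle turns suffix sums into (total - prefix sums)
theorem pfx_reverse (M : List Int) (a0 an : Int) :
    an :: pfx an M.reverse
      = ((a0 :: pfx a0 M).map (fun p => a0 + M.sum + an - p)).reverse := by
  induction M generalizing a0 with
  | nil => simp [pfx]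
  | cons m M' ih =>
    rw [List.reverse_cons, pfx_append]
    have h1 : an :: (pfx an M'.reverse ++ pfx (an + M'.reverse.sum) [m])
        = (an :: pfx an M'.reverse) ++ [an + M'.sum + m] := by
      simp [pfx, List.sum_reverse]
    rw [h1, ih (a0 + m), pfx_cons]
    simp only [List.map_cons, List.reverse_cons, List.sum_cons]
    congr 1
    · congr 1
      · congr 1
        apply List.map_congr_left
        intro p _
        ring
      · congr 1
        ring
    · congr 1
      ring

-- min-fold algebra
theorem foldl_min_pull (t : List Int) (a x : Int) :
    t.foldl min (min a x) = min (t.foldl min a) x := by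
  induction t generalizing a with
  | nil => rfl
  | cons y u ih =>
    simp only [List.foldl_cons]
    rw [min_right_comm a x y, ih]

theorem foldl_min_reverse (l : List Int) (a : Int) :
    l.reverse.foldl min a = l.foldl min a := by
  induction l generalizing a with
  | nil => rfl
  | cons x t ih =>
    rw [List.reverse_cons, List.foldl_append, ih]
    simp only [List.foldl_cons, List.foldl_nil]
    rw [foldl_min_pull]

theorem foldl_min_absorb (t : List Int) (b c : Int) (hc : c ∈ t) :
    t.foldl min (min b c) = t.foldl min b := by
  induction t generalizing b with
  | nil => simp at hc
  | cons y u ih =>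
    simp only [List.foldl_cons]
    rcases List.mem_cons.mp hc with h | h
    · subst h
      rw [min_assoc, min_self]
    · rw [min_right_comm b c y, ih _ h]

-- ===== VERDICT (by name: the statement is the Claim_ definition above) =====
theorem solution_spec : Claim_equal_solution := by
  intro A _hdom hpre
  unfold Pre_solution at hpre
  -- decompose A = a0 :: M ++ [an]
  obtain ⟨a0, t, rfl⟩ : ∃ a0 t, A = a0 :: t := by
    cases A with
    | nil => simp at hpre
    | cons a t => exact ⟨a, t, rfl⟩
  have ht : t ≠ [] := by intro h; subst h; simp at hpre
  obtain ⟨M, an, rfl⟩ : ∃ M an, t = M ++ [an] := by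
    refine ⟨t.dropLast, t.getLast ht, ?_⟩
    exact (List.dropLast_append_getLast ht).symm
  set T : Int := (a0 :: (M ++ [an])).sum with hT
  have hTval : T = a0 + M.sum + an := by simp [hT]; ring
  unfold Spec_solution solution solution_alt
  -- ===== A side =====
  rw [foldlA_eq]
  simp only [List.nil_append]
  have hps : pfx 0 (a0 :: (M ++ [an])) = (a0 :: pfx a0 M) ++ [T] := by
    rw [pfx_cons, pfx_append]
    simp [pfx, hTval]
  rw [hps]
  have hlenps : ((a0 :: pfx a0 M) ++ [T]).length = M.length + 2 := by
    simp [pfx_length]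
  have hlast : PySem.List.pyGetD ((a0 :: pfx a0 M) ++ [T]) (-1) 0 = T :=
    PySem.List.pyGetD_neg_one_append_singleton (a0 :: pfx a0 M) T 0
  rw [hlast]
  rw [PySem.List.pyRange_one 0 ((((a0 :: pfx a0 M) ++ [T]).length : Int) - 1)]
  have hcast : (((((a0 :: pfx a0 M) ++ [T]).length : Int) - 1) - 0).toNat = M.length + 1 := by
    rw [hlenps]; omega
  rw [hcast]
  rw [List.foldl_map, foldl_append_map, List.nil_append]
  have key :
      (List.range (M.length + 1)).map
        (fun (k : Nat) => |PySem.List.pyGetD ((a0 :: pfx a0 M) ++ [T]) (0 + (k : Int)) 0 -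
            (T - PySem.List.pyGetD ((a0 :: pfx a0 M) ++ [T]) (0 + (k : Int)) 0)|)
      = (a0 :: pfx a0 M).map (fun p => |p - (T - p)|) := by
    have h1 : (((a0 :: pfx a0 M) ++ [T]).take (M.length + 1)) = a0 :: pfx a0 M := by
      rw [List.take_append_of_le_length (by simp [pfx_length])]
      exact List.take_of_length_le (by simp [pfx_length])
    have hidx : (List.range (M.length + 1)).map
        (fun (k : Nat) => PySem.List.pyGetD ((a0 :: pfx a0 M) ++ [T]) ((k : Nat) : Int) 0)
        = a0 :: pfx a0 M := by
      rw [map_range_pyGetD ((a0 :: pfx a0 M) ++ [T]) (M.length + 1) (by rw [hlenps]; omega)]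
      exact h1
    conv_rhs => rw [← hidx, List.map_map]
    apply List.map_congr_left
    intro k _
    simp [Function.comp]
  rw [key]
  rw [List.map_cons, PySem.List.min?_id_cons, Option.getD_some]
  -- ===== B side =====
  have hget : PySem.List.pyGet? (a0 :: (M ++ [an])) (-1) = some an := by
    rw [PySem.List.pyGet?_neg_one, show a0 :: (M ++ [an]) = (a0 :: M) ++ [an] from rfl,
        List.getLast?_concat]
  rw [hget]
  simp only [Option.getD_some]
  have hslice : PySem.List.slice (a0 :: (M ++ [an])) (some 1) (some (-1)) = M := by
    rw [slice_one_neg_one]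
    simp
  rw [hslice]
  rw [foldlB_eq (fun r => |2 * r - T|) M.reverse |2 * an - T| an]
  simp only
  -- rewrite B's scanned list via pfx_reverse
  set g' : Int → Int := fun p => |p - (T - p)| with hg'
  have hmapeq : |2 * an - T| :: ((pfx an M.reverse).map (fun r => |2 * r - T|))
      = ((a0 :: pfx a0 M).map g').reverse := by
    have h0 : |2 * an - T| :: ((pfx an M.reverse).map (fun r => |2 * r - T|))
        = (an :: pfx an M.reverse).map (fun r => |2 * r - T|) := by simp
    rw [h0, pfx_reverse M a0 an, List.map_reverse, List.map_map]
    congr 1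
    apply List.map_congr_left
    intro p _
    simp only [Function.comp, hg', hTval]
    have : 2 * (a0 + M.sum + an - p) - (a0 + M.sum + an) = -(p - (a0 + M.sum + an - p)) := by ring
    rw [this, abs_neg]
  -- B's fold = fold over the reversed A-side list seeded with its head
  have hB : ((pfx an M.reverse).map (fun r => |2 * r - T|)).foldl min |2 * an - T|
      = ((a0 :: pfx a0 M).map g').reverse.foldl min |2 * an - T| := by
    have := congrArg (fun l => l.foldl min |2 * an - T|) hmapeq
    simp only [List.foldl_cons] at this
    rw [min_self] at this
    exact this
  rw [hB, foldl_min_reverse]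
  simp only [List.map_cons, List.foldl_cons]
  -- absorb the extra seed |2*an - T| = g' (a0 + M.sum)
  have hgan : |2 * an - T| = g' (a0 + M.sum) := by
    simp only [hg', hTval]
    have : a0 + M.sum - (a0 + M.sum + an - (a0 + M.sum)) = -(2 * an - (a0 + M.sum + an)) := by ring
    rw [this, abs_neg]
  cases M with
  | nil => simp [pfx, hgan, hg']
  | cons m M' =>
    have hmem : g' (a0 + (m :: M').sum) ∈ (pfx a0 (m :: M')).map g' := by
      have hl : (pfx a0 (m :: M')).getLast? = some (a0 + (m :: M').sum) :=
        pfx_getLast? a0 (m :: M') (by simp)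
      have hmem' : (a0 + (m :: M').sum) ∈ pfx a0 (m :: M') :=
        List.mem_of_getLast? hl
      exact List.mem_map_of_mem hmem'
    rw [min_comm |2 * an - T| (g' a0), hgan, foldl_min_absorb _ _ _ hmem]
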